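-- pv_equiv track=rewrite | github.com/dwjstar/Coding | leetcode/offer/offer17.py | printNum
-- ===== SOURCE A (Python) =====
-- def printNum(n):
--     if n<=0:
--         return
--     max_n=10**n
--     res=[]
--     for i in range(1,max_n):
--         res.append(i)
--     return res
-- ===== SOURCE B (Python) =====
-- def printNum(n):
--     if n <= 0:
--         return None
--     res = []
--     for L in range(1, n + 1):
--         # numbers of exactly L digits, grown digit by digit from the first digit 1-9
--         nums = list(range(1, 10))
--         for _ in range(L - 1):
--             nums = [x * 10 + d for x in nums for d in range(10)]
--         res.extend(nums)
--     return res
-- ===== Notes on version B (the rewrite author's own statement) =====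
-- stated objective: alternative
-- what changed: B replaces A's single linear counting loop over the whole range by a per-length digit-tree expansion: for each digit length it starts from the nonzero leading digits and repeatedly expands every prefix by one more digit, concatenating the blocks in ascending order.
import Mathlib
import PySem

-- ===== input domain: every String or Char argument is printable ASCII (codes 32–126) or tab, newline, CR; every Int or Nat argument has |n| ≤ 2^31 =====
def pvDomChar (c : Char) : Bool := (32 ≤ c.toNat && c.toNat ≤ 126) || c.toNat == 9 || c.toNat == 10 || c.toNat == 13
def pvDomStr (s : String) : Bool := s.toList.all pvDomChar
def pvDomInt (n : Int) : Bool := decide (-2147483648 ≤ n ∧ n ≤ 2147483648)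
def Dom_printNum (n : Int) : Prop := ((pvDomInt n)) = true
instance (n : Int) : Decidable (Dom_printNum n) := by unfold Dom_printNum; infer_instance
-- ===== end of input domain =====

-- B replaces A's linear counting over range(1, 10**n) by a recursive digit-by-digit
-- DFS over the digit tree (same values, same order); objective: alternative algorithm.

-- ===== PORT A =====
def printNum (n : Int) : Option (List Int) :=
  if n ≤ 0 then none
  else
    let max_n : Int := 10 ^ n.toNat
    some ((PySem.List.pyRange 1 max_n 1).foldl (fun res i => res ++ [i]) [])

-- ===== PORT B =====
def printNum_alt (n : Int) : Option (List Int) :=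
  if n ≤ 0 then none
  else
    some ((PySem.List.pyRange 1 (n + 1) 1).foldl
      (fun res L =>
        res ++
          (PySem.List.pyRange 0 (L - 1) 1).foldl
            (fun nums _ =>
              nums.flatMap (fun x => (PySem.List.pyRange 0 10 1).map (fun d => x * 10 + d)))
            (PySem.List.pyRange 1 10 1))
      [])

-- ===== PRECONDITION & SPEC =====
def Spec_printNum (n : Int) (out : Option (List Int)) : Prop := out = printNum_alt n
instance (n : Int) (out : Option (List Int)) : Decidable (Spec_printNum n out) := by unfold Spec_printNum; infer_instance

-- ===== CLAIM (what is proved, stated in full; the proofs are below) =====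
def Claim_equal_printNum : Prop := ∀ (n : Int), Dom_printNum n → Spec_printNum n (printNum n)

-- ===== LEMMAS AND PROOFS =====

-- the integer interval [a, a+m) as a list
def pvIv (a : Int) (m : Nat) : List Int := List.map (fun k : Nat => a + (k : Int)) (List.range m)

theorem pvIv_succ (a : Int) (m : Nat) :
    pvIv a (m + 1) = pvIv a m ++ [a + m] := by
  simp [pvIv, List.range_succ]

theorem pvIv_append (a : Int) (m m' : Nat) :
    pvIv a m ++ pvIv (a + m) m' = pvIv a (m + m') := by
  induction m' with
  | zero => simp [pvIv]
  | succ m' ih =>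
    rw [pvIv_succ, ← List.append_assoc, ih,
      show m + (m' + 1) = (m + m') + 1 from by ring, pvIv_succ]
    congr 2
    push_cast
    ring

theorem pvIv_append' (a a' : Int) (m m' m'' : Nat)
    (h1 : a' = a + m) (h2 : m'' = m + m') :
    pvIv a m ++ pvIv a' m' = pvIv a m'' := by
  subst h1 h2; exact pvIv_append a m m'

theorem pvDigits (y : Int) :
    (PySem.List.pyRange 0 10 1).map (fun d => y * 10 + d) = pvIv (y * 10) 10 := by
  have h10 : PySem.List.pyRange 0 10 1 = [0, 1, 2, 3, 4, 5, 6, 7, 8, 9] := by decide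
  rw [h10]
  simp [pvIv, List.range_succ]

theorem pvExpand (a : Int) (m : Nat) :
    (pvIv a m).flatMap (fun x => (PySem.List.pyRange 0 10 1).map (fun d => x * 10 + d))
      = pvIv (a * 10) (m * 10) := by
  induction m with
  | zero => simp [pvIv]
  | succ m ih =>
    rw [pvIv_succ, List.flatMap_append, ih]
    simp only [List.flatMap_cons, List.flatMap_nil, List.append_nil]
    rw [pvDigits]
    apply pvIv_append'
    · push_cast; ring
    · ring

-- the inner loop: L-1 digit expansions of the first-digit list [1..9]
theorem pvIter_eq : ∀ (j : Nat),
    (PySem.List.pyRange 0 (j : Int) 1).foldl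
        (fun nums _ =>
          nums.flatMap (fun x => (PySem.List.pyRange 0 10 1).map (fun d => x * 10 + d)))
        (PySem.List.pyRange 1 10 1)
      = pvIv (10 ^ j) (9 * 10 ^ j) := by
  intro j
  induction j with
  | zero =>
    decide
  | succ j ih =>
    have hsplit : PySem.List.pyRange 0 ((j : Int) + 1) 1
        = PySem.List.pyRange 0 (j : Int) 1 ++ [(j : Int)] := by
      have := PySem.List.pyRange_one_succ_right (a := 0) (b := (j : Int)) (by omega)
      simpa using this
    have hcast : ((j + 1 : Nat) : Int) = (j : Int) + 1 := by push_cast; ring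
    rw [hcast, hsplit, List.foldl_append]
    simp only [List.foldl_cons, List.foldl_nil]
    rw [ih, pvExpand]
    congr 1
    ring

-- the outer loop over lengths 1..j produces the interval [1, 10^j)
theorem pvOuter_eq : ∀ (j : Nat) (res : List Int),
    (PySem.List.pyRange 1 (1 + (j : Int)) 1).foldl
        (fun res L =>
          res ++
            (PySem.List.pyRange 0 (L - 1) 1).foldl
              (fun nums _ =>
                nums.flatMap (fun x => (PySem.List.pyRange 0 10 1).map (fun d => x * 10 + d)))
              (PySem.List.pyRange 1 10 1))
        res
      = res ++ pvIv 1 (10 ^ j - 1) := by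
  intro j
  induction j with
  | zero => intro res; simp [PySem.List.pyRange_one_eq_nil, pvIv]
  | succ j ihj =>
    intro res
    have hsplit : PySem.List.pyRange 1 (1 + ((j : Int) + 1)) 1
        = PySem.List.pyRange 1 (1 + (j : Int)) 1 ++ [1 + (j : Int)] := by
      have := PySem.List.pyRange_one_succ_right (a := 1) (b := 1 + (j : Int)) (by omega)
      simpa [add_assoc] using this
    have hcast : (1 : Int) + ((j + 1 : Nat) : Int) = 1 + ((j : Int) + 1) := by push_cast; ring
    rw [hcast, hsplit, List.foldl_append]
    simp only [List.foldl_cons, List.foldl_nil]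
    rw [ihj]
    have hL : (1 : Int) + (j : Int) - 1 = (j : Int) := by omega
    rw [hL, pvIter_eq, List.append_assoc]
    congr 1
    apply pvIv_append'
    · have h1 : (1 : Nat) ≤ 10 ^ j := Nat.one_le_pow _ _ (by norm_num)
      push_cast [h1]
      ring
    · have h1 : (1 : Nat) ≤ 10 ^ j := Nat.one_le_pow _ _ (by norm_num)
      have : (10 : Nat) ^ (j + 1) = 10 * 10 ^ j := by ring
      omega

theorem pvRange_eq_Iv (j : Nat) :
    PySem.List.pyRange 1 ((10 : Int) ^ j) 1 = pvIv 1 (10 ^ j - 1) := by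
  have h : ((10 : Int) ^ j - 1).toNat = 10 ^ j - 1 := by
    have hc : ((10 : Nat) ^ j : Int) = (10 : Int) ^ j := by push_cast; ring
    omega
  rw [PySem.List.pyRange_one, h]
  rfl

-- ===== VERDICT (by name: the statement is the Claim_ definition above) =====
theorem printNum_spec : Claim_equal_printNum := by
  intro n _
  unfold Spec_printNum printNum printNum_alt
  by_cases h : n ≤ 0
  · simp [h]
  · simp only [h, if_false]
    have hn : n + 1 = 1 + (n.toNat : Int) := by omega
    rw [hn, pvOuter_eq, PySem.List.foldl_append_singleton_eq_self, pvRange_eq_Iv]
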